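-- pv_equiv track=rewrite | github.com/yingcongtan/pdpt_2022 | src/util.py | generate_node_cargo_size_change
-- ===== SOURCE A (Python) =====
-- def generate_node_cargo_size_change(node_list, cargo):
--     """
--     Generate node_cargo_size_change,
--     which is very useful in the PDPTW or PDOTW model.
--
--     Inputs:
--         node_list = [N1, N2, ...]
--         cargo[c] = (size, lb, ub, origin, destination)
--     Outputs:
--         node_cargo_size_change[(n, c)] =  0 if n is not oc / dc
--         node_cargo_size_change[(n, c)] =  cargo_size if n is oc
--         node_cargo_size_change[(n, c)] = -cargo_size if n is dc
--     """
--
--     node_cargo_size_change = {}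
--     for n in node_list:
--         for c in cargo.keys():
--             if n == cargo[c][3]:
--                 node_cargo_size_change[(n, c)] = cargo[c][0]
--             elif n == cargo[c][4]:
--                 node_cargo_size_change[(n, c)] = -cargo[c][0]
--             else:
--                 node_cargo_size_change[(n, c)] = 0
--
--     return node_cargo_size_change
-- ===== SOURCE B (Python) =====
-- def generate_node_cargo_size_change(node_list, cargo):
--     # Initialise every (node, cargo) entry to 0, then overwrite the endpoints
--     # of each cargo: destination first, then origin (origin wins on a self-loop).
--     node_cargo_size_change = {(n, c): 0 for n in node_list for c in cargo}
--     for c, spec in cargo.items():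
--         size, oc, dc = spec[0], spec[3], spec[4]
--         if (dc, c) in node_cargo_size_change:
--             node_cargo_size_change[(dc, c)] = -size
--         if (oc, c) in node_cargo_size_change:
--             node_cargo_size_change[(oc, c)] = size
--     return node_cargo_size_change
-- ===== Notes on version B (the rewrite author's own statement) =====
-- stated objective: alternative
-- what changed: Instead of deciding origin/destination/zero per (node, cargo) pair inside nested loops, B fills the whole dict with zeros and then makes one pass over cargo overwriting only the two endpoint entries (destination before origin, guarded by key existence).
import Mathlib
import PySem

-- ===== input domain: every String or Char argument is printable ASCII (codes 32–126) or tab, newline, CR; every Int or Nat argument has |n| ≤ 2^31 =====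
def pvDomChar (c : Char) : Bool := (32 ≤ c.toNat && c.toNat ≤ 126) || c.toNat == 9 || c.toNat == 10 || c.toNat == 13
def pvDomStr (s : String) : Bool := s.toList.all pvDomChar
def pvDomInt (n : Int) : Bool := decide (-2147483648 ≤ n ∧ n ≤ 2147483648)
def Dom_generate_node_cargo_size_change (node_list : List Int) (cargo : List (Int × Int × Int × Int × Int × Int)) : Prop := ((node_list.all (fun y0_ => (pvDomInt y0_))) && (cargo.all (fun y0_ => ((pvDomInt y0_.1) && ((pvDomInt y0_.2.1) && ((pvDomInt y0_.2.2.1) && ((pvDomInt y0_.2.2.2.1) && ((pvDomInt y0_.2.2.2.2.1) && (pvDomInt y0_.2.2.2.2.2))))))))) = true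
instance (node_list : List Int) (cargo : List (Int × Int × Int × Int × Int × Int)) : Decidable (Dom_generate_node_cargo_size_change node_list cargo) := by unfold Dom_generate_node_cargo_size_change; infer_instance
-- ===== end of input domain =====

-- B zero-fills the (node, cargo) table once and then overwrites only the two endpoint
-- entries per cargo in a single pass (destination first, so origin wins on a self-loop),
-- instead of A's per-pair three-way branch inside the nested loops; same asymptotic cost.


-- ===== PORT A =====
-- cargo is a Python dict {c: (size, lb, ub, origin, destination)}; it arrives as the
-- association list of 6-tuples, which both ports read into a PySem.Dict as Python does.
def generate_node_cargo_size_change (node_list : List Int) (cargo : List (Int × Int × Int × Int × Int × Int)) : List (Int × Int × Int) :=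
  let cd : PySem.Dict Int (Int × Int × Int × Int × Int) :=
    PySem.Dict.ofList (cargo.map (fun t => (t.1, t.2)))
  let d : PySem.Dict (Int × Int) Int :=
    node_list.foldl (fun d n =>
      cd.keys.foldl (fun d c =>
        -- cargo[c]: c comes from cd.keys, so the lookup succeeds (getD with dummy default)
        let v := cd.getD c (0, 0, 0, 0, 0)
        if n = v.2.2.2.1 then d.insert (n, c) v.1
        else if n = v.2.2.2.2 then d.insert (n, c) (-v.1)
        else d.insert (n, c) 0) d) PySem.Dict.empty
  d.items.map (fun p => (p.1.1, p.1.2, p.2))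

-- ===== PORT B =====
-- the body of Source B's endpoint-overwrite loop: destination first, then origin, each
-- guarded by key existence ('(dc, c) in node_cargo_size_change')
def pvStep (d : PySem.Dict (Int × Int) Int) (t : Int × Int × Int × Int × Int × Int) : PySem.Dict (Int × Int) Int :=
  let c := t.1
  let s := t.2.1
  let oc := t.2.2.2.2.1
  let dc := t.2.2.2.2.2
  let d1 := if d.contains (dc, c) then d.insert (dc, c) (-s) else d
  if d1.contains (oc, c) then d1.insert (oc, c) s else d1

def generate_node_cargo_size_change_alt (node_list : List Int) (cargo : List (Int × Int × Int × Int × Int × Int)) : List (Int × Int × Int) :=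
  let cd : PySem.Dict Int (Int × Int × Int × Int × Int) :=
    PySem.Dict.ofList (cargo.map (fun t => (t.1, t.2)))
  -- {(n, c): 0 for n in node_list for c in cargo}
  let res0 : PySem.Dict (Int × Int) Int :=
    node_list.foldl (fun d n =>
      cd.keys.foldl (fun d c => d.insert (n, c) 0) d) PySem.Dict.empty
  -- for c, spec in cargo.items(): overwrite the two endpoint entries
  let res := cd.items.foldl pvStep res0
  res.items.map (fun p => (p.1.1, p.1.2, p.2))

-- ===== PRECONDITION & SPEC =====
def Spec_generate_node_cargo_size_change (node_list : List Int) (cargo : List (Int × Int × Int × Int × Int × Int)) (out : List (Int × Int × Int)) : Prop := out = generate_node_cargo_size_change_alt node_list cargo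
instance (node_list : List Int) (cargo : List (Int × Int × Int × Int × Int × Int)) (out : List (Int × Int × Int)) : Decidable (Spec_generate_node_cargo_size_change node_list cargo out) := by unfold Spec_generate_node_cargo_size_change; infer_instance

-- ===== CLAIM (what is proved, stated in full; the proofs are below) =====
def Claim_equal_generate_node_cargo_size_change : Prop := ∀ (node_list : List Int) (cargo : List (Int × Int × Int × Int × Int × Int)), Dom_generate_node_cargo_size_change node_list cargo → Spec_generate_node_cargo_size_change node_list cargo (generate_node_cargo_size_change node_list cargo)

-- ===== LEMMAS AND PROOFS =====

-- the value A assigns to the pair (n, c)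
def pvVal (cd : PySem.Dict Int (Int × Int × Int × Int × Int)) (n c : Int) : Int :=
  let v := cd.getD c (0, 0, 0, 0, 0)
  if n = v.2.2.2.1 then v.1 else if n = v.2.2.2.2 then -v.1 else 0

-- the nested key-insertion loop both ports start from (A with pvVal, B with 0)
def pvBuild (g : Int → Int → Int) (nl ks : List Int) (d : PySem.Dict (Int × Int) Int) : PySem.Dict (Int × Int) Int :=
  nl.foldl (fun d n => ks.foldl (fun d c => d.insert (n, c) (g n c)) d) d

theorem pvInner_getD (g : Int → Int → Int) (n : Int) (ks : List Int) (d : PySem.Dict (Int × Int) Int)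
    (p : Int × Int) (dflt : Int) :
    (ks.foldl (fun d c => d.insert (n, c) (g n c)) d).getD p dflt =
      if p.1 = n ∧ p.2 ∈ ks then g n p.2 else d.getD p dflt := by
  induction ks generalizing d with
  | nil => simp
  | cons c cs ih =>
    simp only [List.foldl_cons, ih, PySem.Dict.getD_insert, List.mem_cons]
    obtain ⟨a, b⟩ := p
    by_cases h1 : a = n <;> by_cases h2 : b = c <;> by_cases h3 : b ∈ cs <;>
      simp_all [Prod.ext_iff]

theorem pvBuild_getD (g : Int → Int → Int) (nl ks : List Int) (d : PySem.Dict (Int × Int) Int)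
    (p : Int × Int) (dflt : Int) :
    (pvBuild g nl ks d).getD p dflt =
      if p.1 ∈ nl ∧ p.2 ∈ ks then g p.1 p.2 else d.getD p dflt := by
  induction nl generalizing d with
  | nil => simp [pvBuild]
  | cons n ns ih =>
    simp only [pvBuild, List.foldl_cons] at ih ⊢
    rw [ih, pvInner_getD]
    obtain ⟨a, b⟩ := p
    by_cases h1 : a = n <;> by_cases h2 : a ∈ ns <;> by_cases h3 : b ∈ ks <;> simp_all

theorem pvInner_keys_mem (g : Int → Int → Int) (n : Int) (ks : List Int) (d : PySem.Dict (Int × Int) Int)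
    (p : Int × Int) :
    p ∈ (ks.foldl (fun d c => d.insert (n, c) (g n c)) d).keys ↔
      (p.1 = n ∧ p.2 ∈ ks) ∨ p ∈ d.keys := by
  induction ks generalizing d with
  | nil => simp
  | cons c cs ih =>
    simp only [List.foldl_cons, ih, PySem.Dict.mem_keys_insert, List.mem_cons]
    obtain ⟨a, b⟩ := p
    by_cases h1 : a = n <;> by_cases h2 : b = c <;> simp_all [Prod.ext_iff]

theorem pvBuild_keys_mem (g : Int → Int → Int) (nl ks : List Int) (d : PySem.Dict (Int × Int) Int)
    (p : Int × Int) :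
    p ∈ (pvBuild g nl ks d).keys ↔ (p.1 ∈ nl ∧ p.2 ∈ ks) ∨ p ∈ d.keys := by
  induction nl generalizing d with
  | nil => simp [pvBuild]
  | cons n ns ih =>
    simp only [pvBuild, List.foldl_cons] at ih ⊢
    rw [ih, pvInner_keys_mem]
    obtain ⟨a, b⟩ := p
    by_cases h1 : a = n <;> simp_all

theorem pvKeys_insert_congr (d d' : PySem.Dict (Int × Int) Int) (k : Int × Int) (v v' : Int)
    (h : d.keys = d'.keys) : (d.insert k v).keys = (d'.insert k v').keys := by
  by_cases hc : k ∈ d.keys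
  · rw [PySem.Dict.keys_insert_of_contains d v ((PySem.Dict.contains_iff_mem_keys d k).2 hc),
      PySem.Dict.keys_insert_of_contains d' v' ((PySem.Dict.contains_iff_mem_keys d' k).2 (h ▸ hc)), h]
  · have h1 : d.contains k = false := by
      rw [Bool.eq_false_iff]; simpa [PySem.Dict.contains_iff_mem_keys] using hc
    have h2 : d'.contains k = false := by
      rw [h] at hc
      rw [Bool.eq_false_iff]; simpa [PySem.Dict.contains_iff_mem_keys] using hc
    rw [PySem.Dict.keys_insert_of_not_contains d v h1,
      PySem.Dict.keys_insert_of_not_contains d' v' h2, h]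

theorem pvInner_keys_congr (g g' : Int → Int → Int) (n : Int) (ks : List Int)
    (d d' : PySem.Dict (Int × Int) Int) (h : d.keys = d'.keys) :
    (ks.foldl (fun d c => d.insert (n, c) (g n c)) d).keys =
      (ks.foldl (fun d c => d.insert (n, c) (g' n c)) d').keys := by
  induction ks generalizing d d' with
  | nil => simpa using h
  | cons c cs ih => exact ih _ _ (pvKeys_insert_congr _ _ _ _ _ h)

theorem pvBuild_keys_congr (g g' : Int → Int → Int) (nl ks : List Int)
    (d d' : PySem.Dict (Int × Int) Int) (h : d.keys = d'.keys) :
    (pvBuild g nl ks d).keys = (pvBuild g' nl ks d').keys := by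
  induction nl generalizing d d' with
  | nil => simpa [pvBuild] using h
  | cons n ns ih =>
    simp only [pvBuild, List.foldl_cons] at ih ⊢
    exact ih _ _ (pvInner_keys_congr g g' n ks d d' h)

theorem pvInner_nodup (g : Int → Int → Int) (n : Int) (ks : List Int)
    (d : PySem.Dict (Int × Int) Int) (h : d.keys.Nodup) :
    (ks.foldl (fun d c => d.insert (n, c) (g n c)) d).keys.Nodup := by
  induction ks generalizing d with
  | nil => exact h
  | cons c cs ih => exact ih _ (PySem.Dict.nodup_keys_insert d _ _ h)

theorem pvBuild_nodup (g : Int → Int → Int) (nl ks : List Int) (d : PySem.Dict (Int × Int) Int)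
    (h : d.keys.Nodup) : (pvBuild g nl ks d).keys.Nodup := by
  induction nl generalizing d with
  | nil => exact h
  | cons n ns ih =>
    simp only [pvBuild, List.foldl_cons] at ih ⊢
    exact ih _ (pvInner_nodup g n ks d h)

theorem pvStep_keys (d : PySem.Dict (Int × Int) Int) (t : Int × Int × Int × Int × Int × Int) :
    (pvStep d t).keys = d.keys := by
  simp only [pvStep]
  split_ifs with h1 h2 h3 <;>
    simp_all only [PySem.Dict.contains_iff_mem_keys, PySem.Dict.mem_keys_insert] <;>
    try rfl
  · rw [PySem.Dict.keys_insert_of_contains, PySem.Dict.keys_insert_of_contains]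
    · simpa [PySem.Dict.contains_iff_mem_keys] using h1
    · rcases h2 with h | h
      · rw [Prod.ext_iff] at h
        rw [h.1]
        simp
      · simp [PySem.Dict.contains_iff_mem_keys, PySem.Dict.mem_keys_insert, h]
  · rw [PySem.Dict.keys_insert_of_contains]
    simpa [PySem.Dict.contains_iff_mem_keys] using h1
  · rw [PySem.Dict.keys_insert_of_contains]
    simpa [PySem.Dict.contains_iff_mem_keys] using h3

theorem pvStep_getD_other (d : PySem.Dict (Int × Int) Int) (t : Int × Int × Int × Int × Int × Int)
    (m k dflt : Int) (hk : t.1 ≠ k) :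
    (pvStep d t).getD (m, k) dflt = d.getD (m, k) dflt := by
  simp only [pvStep]
  split_ifs <;> simp [PySem.Dict.getD_insert, Prod.ext_iff, Ne.symm hk]

theorem pvStep_getD_self (d : PySem.Dict (Int × Int) Int) (t : Int × Int × Int × Int × Int × Int)
    (m dflt : Int) (hm : d.contains (m, t.1) = true) :
    (pvStep d t).getD (m, t.1) dflt =
      if m = t.2.2.2.2.1 then t.2.1
      else if m = t.2.2.2.2.2 then -t.2.1
      else d.getD (m, t.1) dflt := by
  simp only [pvStep]
  by_cases ho : m = t.2.2.2.2.1 <;> by_cases hd : m = t.2.2.2.2.2 <;>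
    split_ifs <;>
    simp_all [PySem.Dict.getD_insert, PySem.Dict.contains_insert, Prod.ext_iff]

theorem pvPass_keys (l : List (Int × Int × Int × Int × Int × Int)) (d : PySem.Dict (Int × Int) Int) :
    (l.foldl pvStep d).keys = d.keys := by
  induction l generalizing d with
  | nil => rfl
  | cons t ts ih => rw [List.foldl_cons, ih, pvStep_keys]

theorem pvContains_eq_of_keys_eq (d d' : PySem.Dict (Int × Int) Int) (h : d.keys = d'.keys)
    (p : Int × Int) : d.contains p = d'.contains p := by
  by_cases hp : p ∈ d.keys
  · rw [(PySem.Dict.contains_iff_mem_keys d p).2 hp,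
      (PySem.Dict.contains_iff_mem_keys d' p).2 (h ▸ hp)]
  · have h1 : d.contains p = false := by
      rw [Bool.eq_false_iff]; simpa [PySem.Dict.contains_iff_mem_keys] using hp
    have h2 : d'.contains p = false := by
      rw [h] at hp
      rw [Bool.eq_false_iff]; simpa [PySem.Dict.contains_iff_mem_keys] using hp
    rw [h1, h2]

theorem pvPass_getD_untouched (l : List (Int × Int × Int × Int × Int × Int))
    (d : PySem.Dict (Int × Int) Int) (m k dflt : Int) (hk : ∀ t ∈ l, t.1 ≠ k) :
    (l.foldl pvStep d).getD (m, k) dflt = d.getD (m, k) dflt := by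
  induction l generalizing d with
  | nil => rfl
  | cons t ts ih =>
    rw [List.foldl_cons, ih _ (fun t ht => hk t (List.mem_cons_of_mem _ ht)),
      pvStep_getD_other _ _ _ _ _ (hk t (List.mem_cons_self))]

theorem pvSplit_of_nodup_fst {β : Type} {l : List (Int × β)} (hnd : (l.map Prod.fst).Nodup)
    {k : Int} {v : β} (hm : (k, v) ∈ l) :
    ∃ l1 l2, l = l1 ++ (k, v) :: l2 ∧ (∀ t ∈ l1, t.1 ≠ k) ∧ (∀ t ∈ l2, t.1 ≠ k) := by
  obtain ⟨l1, l2, rfl⟩ := List.append_of_mem hm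
  rw [List.map_append, List.map_cons] at hnd
  simp only [List.nodup_append, List.nodup_cons] at hnd
  refine ⟨l1, l2, rfl, ?_, ?_⟩ <;> intro t ht heq
  · exact hnd.2.2 t.1 (List.mem_map_of_mem ht) k (List.mem_cons_self) heq
  · exact hnd.2.1.1 (heq ▸ List.mem_map_of_mem ht)

theorem pvPass_getD_main (l : List (Int × Int × Int × Int × Int × Int))
    (d : PySem.Dict (Int × Int) Int) (m k dflt : Int) (v : Int × Int × Int × Int × Int)
    (hnd : (l.map Prod.fst).Nodup) (hm : (k, v) ∈ l) (hc : d.contains (m, k) = true) :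
    (l.foldl pvStep d).getD (m, k) dflt =
      if m = v.2.2.2.1 then v.1
      else if m = v.2.2.2.2 then -v.1
      else d.getD (m, k) dflt := by
  obtain ⟨l1, l2, rfl, h1, h2⟩ := pvSplit_of_nodup_fst hnd hm
  rw [List.foldl_append, List.foldl_cons, pvPass_getD_untouched l2 _ _ _ _ h2]
  have hc' : (l1.foldl pvStep d).contains (m, k) = true := by
    rw [pvContains_eq_of_keys_eq _ d (pvPass_keys l1 d)]; exact hc
  rw [pvStep_getD_self _ ((k, v)) m dflt hc', pvPass_getD_untouched l1 _ _ _ _ h1]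

-- A's nested loop is pvBuild with the three-way branch value pvVal
theorem pvA_eq_build (node_list : List Int) (cd : PySem.Dict Int (Int × Int × Int × Int × Int)) :
    node_list.foldl (fun d n =>
      cd.keys.foldl (fun d c =>
        let v := cd.getD c (0, 0, 0, 0, 0)
        if n = v.2.2.2.1 then d.insert (n, c) v.1
        else if n = v.2.2.2.2 then d.insert (n, c) (-v.1)
        else d.insert (n, c) 0) d) PySem.Dict.empty =
    pvBuild (pvVal cd) node_list cd.keys PySem.Dict.empty := by
  unfold pvBuild
  congr 1
  funext d n
  congr 1
  funext d c
  simp only [pvVal]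
  split_ifs <;> rfl

-- ===== VERDICT (by name: the statement is the Claim_ definition above) =====
theorem generate_node_cargo_size_change_spec : Claim_equal_generate_node_cargo_size_change := by
  intro node_list cargo _
  unfold Spec_generate_node_cargo_size_change
  unfold generate_node_cargo_size_change generate_node_cargo_size_change_alt
  simp only [pvA_eq_build]
  set cd : PySem.Dict Int (Int × Int × Int × Int × Int) :=
    PySem.Dict.ofList (cargo.map (fun t => (t.1, t.2))) with hcd
  set dA := pvBuild (pvVal cd) node_list cd.keys PySem.Dict.empty with hdA
  set res0 := pvBuild (fun _ _ => 0) node_list cd.keys PySem.Dict.empty with hres0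
  have hres0' : node_list.foldl (fun d n => cd.keys.foldl (fun d c => d.insert (n, c) 0) d)
      PySem.Dict.empty = res0 := rfl
  rw [hres0']
  set res := cd.items.foldl pvStep res0 with hres
  -- keys facts
  have hkeysA_nodup : dA.keys.Nodup := pvBuild_nodup _ _ _ _ (by simp)
  have hkeys0 : dA.keys = res0.keys := pvBuild_keys_congr _ _ _ _ _ _ rfl
  have hkeysR : res.keys = res0.keys := pvPass_keys _ _
  have hkeysR_nodup : res.keys.Nodup := by rw [hkeysR, ← hkeys0]; exact hkeysA_nodup
  have hcdnd : cd.keys.Nodup := PySem.Dict.nodup_keys_ofList _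
  -- both item lists via the common key list
  rw [PySem.Dict.items_eq_map_keys dA hkeysA_nodup 0,
    PySem.Dict.items_eq_map_keys res hkeysR_nodup 0, hkeysR, ← hkeys0, List.map_map,
    List.map_map]
  apply List.map_congr_left
  intro p hp
  obtain ⟨a, b⟩ := p
  have hab : a ∈ node_list ∧ b ∈ cd.keys := by
    have := (pvBuild_keys_mem (pvVal cd) node_list cd.keys PySem.Dict.empty (a, b)).1 hp
    simpa using this
  -- A's value
  have hA : dA.getD (a, b) 0 = pvVal cd a b := by
    rw [hdA, pvBuild_getD]; simp [hab.1, hab.2]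
  -- B's value
  obtain ⟨v, hv⟩ : ∃ v, (b, v) ∈ cd.items := by
    have hb := hab.2
    simp only [PySem.Dict.keys, List.mem_map] at hb
    obtain ⟨t, ht, rfl⟩ := hb
    exact ⟨t.2, ht⟩
  have hcdkeys_items : (cd.items.map Prod.fst).Nodup := hcdnd
  have hc0 : res0.contains (a, b) = true := by
    rw [(PySem.Dict.contains_iff_mem_keys res0 (a, b)).2 (hkeys0 ▸ hp)]
  have hB : res.getD (a, b) 0 =
      if a = v.2.2.2.1 then v.1 else if a = v.2.2.2.2 then -v.1 else 0 := by
    rw [hres, pvPass_getD_main cd.items res0 a b 0 v hcdkeys_items hv hc0, hres0, pvBuild_getD]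
    simp [hab.1, hab.2]
  have hcdv : cd.getD b (0, 0, 0, 0, 0) = v := PySem.Dict.getD_of_mem_items cd hv hcdnd _
  simp only [Function.comp_apply]
  rw [hA, hB]
  simp only [pvVal, hcdv]
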